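-- pv_equiv track=rewrite | github.com/iyanmv/advent-of-code-2024 | solutions/day22/part2.py | get_bananas
-- ===== SOURCE A (Python) =====
-- def get_bananas(list_prices, seq):
--     bananas = 0
--     for l in list_prices:
--         for i in range(len(l) - 4):
--             if tuple(_[1] for _ in l[i:i + 4]) == seq:
--                 bananas += l[i + 3][0]
--                 break
--     return bananas
-- ===== SOURCE B (Python) =====
-- def get_bananas(list_prices, seq):
--     total = 0
--     for l in list_prices:
--         d = {}
--         for i in range(len(l) - 4):
--             d.setdefault(tuple(p[1] for p in l[i:i + 4]), l[i + 3][0])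
--         total += d.get(seq, 0)
--     return total
-- ===== Notes on version B (the rewrite author's own statement) =====
-- stated objective: alternative
-- what changed: Replaces the scan-with-early-break per buyer by building a first-occurrence index (dict via setdefault over the same windows) and then a single lookup of seq.
import Mathlib
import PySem

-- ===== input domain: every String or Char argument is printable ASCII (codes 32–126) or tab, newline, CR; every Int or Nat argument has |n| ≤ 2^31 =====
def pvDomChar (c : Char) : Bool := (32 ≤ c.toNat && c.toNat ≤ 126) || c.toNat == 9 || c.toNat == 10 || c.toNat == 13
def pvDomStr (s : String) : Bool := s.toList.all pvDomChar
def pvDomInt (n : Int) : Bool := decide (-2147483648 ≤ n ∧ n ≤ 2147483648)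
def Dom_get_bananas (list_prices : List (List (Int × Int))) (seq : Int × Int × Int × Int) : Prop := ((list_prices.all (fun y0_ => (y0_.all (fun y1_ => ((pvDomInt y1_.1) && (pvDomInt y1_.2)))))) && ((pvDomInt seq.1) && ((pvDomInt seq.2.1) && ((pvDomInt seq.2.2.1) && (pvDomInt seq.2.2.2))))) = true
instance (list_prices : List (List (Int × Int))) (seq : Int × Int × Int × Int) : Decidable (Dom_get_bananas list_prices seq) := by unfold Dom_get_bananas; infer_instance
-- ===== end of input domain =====

-- B replaces A's per-buyer scan-with-early-break by building a first-occurrence window index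
-- (dict via setdefault) and doing a single lookup — an alternative decomposition of the same cost.


-- ===== PORT A =====
-- tuple(_[1] for _ in l[i:i+4]) as a list of the 4 changes (Python tuple equality = list equality here)
def pvChanges (l : List (Int × Int)) (i : Int) : List Int :=
  (PySem.List.slice l (some i) (some (i + 4))).map (·.2)

-- the quadruple seq as the list it is compared against
def pvSeqList (seq : Int × Int × Int × Int) : List Int :=
  [seq.1, seq.2.1, seq.2.2.1, seq.2.2.2]

-- inner 'for i in range(len(l)-4): … break' — first matching window's l[i+3][0], else 0
-- (i+3 is always in range for i drawn from the range, so pyGetD is exact there)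
def pvScanA (l : List (Int × Int)) (seq : Int × Int × Int × Int) : List Int → Int
  | [] => 0
  | i :: is =>
      if pvChanges l i = pvSeqList seq then (PySem.List.pyGetD l (i + 3) (0, 0)).1
      else pvScanA l seq is

def get_bananas (list_prices : List (List (Int × Int))) (seq : Int × Int × Int × Int) : Int :=
  list_prices.foldl
    (fun bananas l => bananas + pvScanA l seq (PySem.List.pyRange 0 ((l.length : Int) - 4) 1)) 0

-- ===== PORT B =====
-- d.setdefault(window, price) over the same index range: first occurrence of each window wins
def pvIndexB (l : List (Int × Int)) : PySem.Dict (List Int) Int :=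
  (PySem.List.pyRange 0 ((l.length : Int) - 4) 1).foldl
    (fun d i => d.setdefault (pvChanges l i) (PySem.List.pyGetD l (i + 3) (0, 0)).1)
    PySem.Dict.empty

def get_bananas_alt (list_prices : List (List (Int × Int))) (seq : Int × Int × Int × Int) : Int :=
  list_prices.foldl (fun total l => total + (pvIndexB l).getD (pvSeqList seq) 0) 0

-- ===== PRECONDITION & SPEC =====
def Spec_get_bananas (list_prices : List (List (Int × Int))) (seq : Int × Int × Int × Int) (out : Int) : Prop := out = get_bananas_alt list_prices seq
instance (list_prices : List (List (Int × Int))) (seq : Int × Int × Int × Int) (out : Int) : Decidable (Spec_get_bananas list_prices seq out) := by unfold Spec_get_bananas; infer_instance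

-- ===== CLAIM (what is proved, stated in full; the proofs are below) =====
def Claim_equal_get_bananas : Prop := ∀ (list_prices : List (List (Int × Int))) (seq : Int × Int × Int × Int), Dom_get_bananas list_prices seq → Spec_get_bananas list_prices seq (get_bananas list_prices seq)

-- ===== LEMMAS AND PROOFS =====

theorem pv_setdefault_not_contains {κ ν : Type} [BEq κ] (d : PySem.Dict κ ν) (k : κ) (v : ν)
    (h : d.contains k = false) : d.setdefault k v = d.insert k v := by
  apply PySem.Dict.ext
  simp [PySem.Dict.setdefault, h, PySem.Dict.items_insert_of_not_contains d v h]

theorem pv_setdefault_contains {κ ν : Type} [BEq κ] (d : PySem.Dict κ ν) (k : κ) (v : ν)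
    (h : d.contains k = true) : d.setdefault k v = d := by
  simp [PySem.Dict.setdefault, h]

-- loop invariant: looking up sl in the setdefault-built dict gives the stored value if sl was
-- already present, else the first match in the remaining indices (A's scan)
theorem pv_build_lookup (l : List (Int × Int)) (seq : Int × Int × Int × Int) :
    ∀ (is : List Int) (d : PySem.Dict (List Int) Int),
    (is.foldl
      (fun d i => d.setdefault (pvChanges l i) (PySem.List.pyGetD l (i + 3) (0, 0)).1) d).getD
        (pvSeqList seq) 0
      = if d.contains (pvSeqList seq) then d.getD (pvSeqList seq) 0 else pvScanA l seq is := by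
  intro is
  induction is with
  | nil =>
    intro d
    cases h : d.contains (pvSeqList seq) with
    | true => simp [pvScanA, h]
    | false => simp [pvScanA, h, PySem.Dict.getD_of_not_contains d 0 h]
  | cons i is ih =>
    intro d
    simp only [List.foldl_cons, ih, pvScanA]
    by_cases hk : pvChanges l i = pvSeqList seq
    · cases h : d.contains (pvSeqList seq) with
      | true =>
        rw [hk, pv_setdefault_contains d _ _ h]
        simp [h]
      | false =>
        rw [hk, pv_setdefault_not_contains d _ _ h]
        simp [PySem.Dict.contains_insert_self, PySem.Dict.getD_insert_self]
    · have hne : pvSeqList seq ≠ pvChanges l i := Ne.symm hk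
      have hins : ∀ v : Int, ((d.setdefault (pvChanges l i) v).contains (pvSeqList seq)
          = d.contains (pvSeqList seq))
          ∧ ((d.setdefault (pvChanges l i) v).getD (pvSeqList seq) 0
          = d.getD (pvSeqList seq) 0) := by
        intro v
        cases hc : d.contains (pvChanges l i) with
        | true => rw [pv_setdefault_contains d _ _ hc]; exact ⟨rfl, rfl⟩
        | false =>
          rw [pv_setdefault_not_contains d _ _ hc]
          exact ⟨by simp [PySem.Dict.contains_insert, hne],
                PySem.Dict.getD_insert_of_ne d v 0 hne⟩
      rcases hins _ with ⟨h1, h2⟩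
      rw [h1, h2]
      simp [hk]

theorem pv_per_buyer (l : List (Int × Int)) (seq : Int × Int × Int × Int) :
    (pvIndexB l).getD (pvSeqList seq) 0
      = pvScanA l seq (PySem.List.pyRange 0 ((l.length : Int) - 4) 1) := by
  rw [pvIndexB, pv_build_lookup]
  simp

-- ===== VERDICT (by name: the statement is the Claim_ definition above) =====
theorem get_bananas_spec : Claim_equal_get_bananas := by
  intro list_prices seq _
  unfold Spec_get_bananas get_bananas get_bananas_alt
  have h : (fun (bananas : Int) (l : List (Int × Int)) =>
        bananas + pvScanA l seq (PySem.List.pyRange 0 ((l.length : Int) - 4) 1))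
      = (fun (total : Int) (l : List (Int × Int)) =>
        total + (pvIndexB l).getD (pvSeqList seq) 0) := by
    funext b l; rw [pv_per_buyer]
  rw [h]
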